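-- pv_equiv track=rewrite | github.com/Choppaaahh/choppa-research | implementation/commit_gate.py | _priority_counts
-- ===== SOURCE A (Python) =====
-- def _priority_counts(entries: list[dict]) -> dict:
--     """Count entries by priority bucket for reporting."""
--     buckets = {0: 0, 1: 0, 2: 0, 3: 0, 4: 0}
--     for e in entries:
--         p = e.get("priority", 4)
--         if p in buckets:
--             buckets[p] += 1
--     return {
--         "cc_operational": buckets[0],
--         "consciousness": buckets[1],
--         "session_notes": buckets[2],
--         "auto_repair": buckets[3],
--         "other": buckets[4],
--     }
-- ===== SOURCE B (Python) =====
-- def _priority_counts(entries: list[dict]) -> dict: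
--     """Count entries by priority bucket for reporting."""
--     return {
--         "cc_operational": sum(1 for e in entries if e.get("priority", 4) == 0),
--         "consciousness": sum(1 for e in entries if e.get("priority", 4) == 1),
--         "session_notes": sum(1 for e in entries if e.get("priority", 4) == 2),
--         "auto_repair": sum(1 for e in entries if e.get("priority", 4) == 3),
--         "other": sum(1 for e in entries if e.get("priority", 4) == 4),
--     }
-- ===== Notes on version B (the rewrite author's own statement) =====
-- stated objective: simpler
-- what changed: Replaced the mutable bucket-dict accumulator loop with a direct dict literal whose five fields are each an independent generator-sum over entries, keeping the missing-key default of 4 and exact == comparisons so out-of-range priorities are dropped as in A.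
import Mathlib
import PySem

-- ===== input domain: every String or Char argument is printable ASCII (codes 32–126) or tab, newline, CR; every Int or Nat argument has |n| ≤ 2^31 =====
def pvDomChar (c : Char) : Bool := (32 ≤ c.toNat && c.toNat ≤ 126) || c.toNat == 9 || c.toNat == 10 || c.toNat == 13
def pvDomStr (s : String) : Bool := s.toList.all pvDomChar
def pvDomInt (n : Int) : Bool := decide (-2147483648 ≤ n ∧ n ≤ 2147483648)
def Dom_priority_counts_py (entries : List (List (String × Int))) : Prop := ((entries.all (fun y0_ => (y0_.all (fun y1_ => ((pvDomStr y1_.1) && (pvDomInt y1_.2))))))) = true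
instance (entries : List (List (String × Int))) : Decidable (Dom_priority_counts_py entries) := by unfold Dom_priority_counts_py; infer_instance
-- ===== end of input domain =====

-- B replaces A's bucket-dict accumulator loop with a dict literal of five independent per-priority count scans (same O(n) cost, simpler decomposition).


-- ===== PORT A =====
def priority_counts_py (entries : List (List (String × Int))) : List (String × Int) :=
  let buckets0 : PySem.Dict Int Int := PySem.Dict.ofList [(0, 0), (1, 0), (2, 0), (3, 0), (4, 0)]
  let buckets := entries.foldl (fun b e =>
    let p := (PySem.Dict.mk e).getD "priority" 4
    if b.contains p then b.modify p 0 (· + 1) else b) buckets0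
  [("cc_operational", buckets.getD 0 0),
   ("consciousness", buckets.getD 1 0),
   ("session_notes", buckets.getD 2 0),
   ("auto_repair", buckets.getD 3 0),
   ("other", buckets.getD 4 0)]

-- ===== PORT B =====
def priority_counts_py_alt (entries : List (List (String × Int))) : List (String × Int) :=
  [("cc_operational", (entries.countP (fun e => (PySem.Dict.mk e).getD "priority" 4 == 0) : Int)),
   ("consciousness", (entries.countP (fun e => (PySem.Dict.mk e).getD "priority" 4 == 1) : Int)),
   ("session_notes", (entries.countP (fun e => (PySem.Dict.mk e).getD "priority" 4 == 2) : Int)),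
   ("auto_repair", (entries.countP (fun e => (PySem.Dict.mk e).getD "priority" 4 == 3) : Int)),
   ("other", (entries.countP (fun e => (PySem.Dict.mk e).getD "priority" 4 == 4) : Int))]

-- ===== PRECONDITION & SPEC =====
def Spec_priority_counts_py (entries : List (List (String × Int))) (out : List (String × Int)) : Prop := out = priority_counts_py_alt entries
instance (entries : List (List (String × Int))) (out : List (String × Int)) : Decidable (Spec_priority_counts_py entries out) := by unfold Spec_priority_counts_py; infer_instance

-- ===== CLAIM (what is proved, stated in full; the proofs are below) =====
def Claim_equal_priority_counts_py : Prop := ∀ (entries : List (List (String × Int))), Dom_priority_counts_py entries → Spec_priority_counts_py entries (priority_counts_py entries)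

-- ===== LEMMAS AND PROOFS =====

set_option maxRecDepth 4096

-- One iteration of A's loop on the fixed 5-key bucket dict: the bucket equal to p (if any) is incremented, others unchanged.
theorem pv_step_eq (p c0 c1 c2 c3 c4 : Int) :
    (if (PySem.Dict.mk [((0:Int), c0), (1, c1), (2, c2), (3, c3), (4, c4)]).contains p
     then (PySem.Dict.mk [((0:Int), c0), (1, c1), (2, c2), (3, c3), (4, c4)]).modify p 0 (· + 1)
     else (PySem.Dict.mk [((0:Int), c0), (1, c1), (2, c2), (3, c3), (4, c4)])) =
    PySem.Dict.mk [(0, c0 + if p == 0 then 1 else 0),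
                   (1, c1 + if p == 1 then 1 else 0),
                   (2, c2 + if p == 2 then 1 else 0),
                   (3, c3 + if p == 3 then 1 else 0),
                   (4, c4 + if p == 4 then 1 else 0)] := by
  by_cases h0 : p = 0 <;> by_cases h1 : p = 1 <;> by_cases h2 : p = 2 <;>
    by_cases h3 : p = 3 <;> by_cases h4 : p = 4 <;>
    simp_all [PySem.Dict.contains, PySem.Dict.modify, PySem.Dict.get?, PySem.Dict.getD,
      PySem.Dict.insert] <;> omega

-- A's whole loop adds, to each bucket k ∈ {0,…,4}, the number of entries whose priority (default 4) equals k.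
theorem pv_loop_eq (l : List (List (String × Int))) : ∀ (c0 c1 c2 c3 c4 : Int),
    l.foldl (fun b e =>
      let p := (PySem.Dict.mk e).getD "priority" 4
      if b.contains p then b.modify p 0 (· + 1) else b)
      (PySem.Dict.mk [(0, c0), (1, c1), (2, c2), (3, c3), (4, c4)]) =
    PySem.Dict.mk [(0, c0 + (l.countP (fun e => (PySem.Dict.mk e).getD "priority" 4 == 0) : Int)),
                   (1, c1 + (l.countP (fun e => (PySem.Dict.mk e).getD "priority" 4 == 1) : Int)),
                   (2, c2 + (l.countP (fun e => (PySem.Dict.mk e).getD "priority" 4 == 2) : Int)),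
                   (3, c3 + (l.countP (fun e => (PySem.Dict.mk e).getD "priority" 4 == 3) : Int)),
                   (4, c4 + (l.countP (fun e => (PySem.Dict.mk e).getD "priority" 4 == 4) : Int))] := by
  induction l with
  | nil => simp
  | cons e l ih =>
    intro c0 c1 c2 c3 c4
    simp only [List.foldl_cons]
    rw [pv_step_eq ((PySem.Dict.mk e).getD "priority" 4) c0 c1 c2 c3 c4]
    rw [ih]
    simp only [List.countP_cons, PySem.Dict.mk.injEq, List.cons.injEq, Prod.mk.injEq]
    and_intros <;> (try trivial) <;> split_ifs <;> simp_all <;> push_cast <;> ring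

-- ===== VERDICT (by name: the statement is the Claim_ definition above) =====
theorem priority_counts_py_spec : Claim_equal_priority_counts_py := by
  intro entries _
  unfold Spec_priority_counts_py priority_counts_py priority_counts_py_alt
  have h0 : (PySem.Dict.ofList [((0:Int), (0:Int)), (1, 0), (2, 0), (3, 0), (4, 0)]) =
      PySem.Dict.mk [(0, 0), (1, 0), (2, 0), (3, 0), (4, 0)] := by decide
  simp only [h0, pv_loop_eq entries 0 0 0 0 0]
  simp [PySem.Dict.getD, PySem.Dict.get?]
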